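-- pv_equiv track=rewrite | github.com/btrif/Python_dev_repo | Project EULER/pb215 Crack-free Walls.py | build_transition_matrix
-- ===== SOURCE A (Python) =====
-- def build_transition_matrix (w): # order of wall labeling doesn't matter
--     t = [ [ 0 for _ in w ] for _ in w ]
--     for i in range (len (w)):
--         for j in range (i):
--             si = [ sum (w[i][:k+1]) for k in range (len (w[i])) ]
--             sj = [ sum (w[j][:k+1]) for k in range (len (w[j])) ]
--             if len (set (si+sj)) < len (w[i]) + len (w[j]) - 1:
--                 t[i][j] = t[j][i] = 0
--             else:
--                 t[i][j] = t[j][i] = 1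
--     return t
-- ===== SOURCE B (Python) =====
-- def build_transition_matrix(w):
--     # Precompute each row's prefix-sum set and duplicate deficit once (A recomputes
--     # prefix sums inside the pair loop); a pair is crack-free iff the total number of
--     # collapsed seam values (intra-row duplicates plus shared distinct seams) is <= 1.
--     n = len(w)
--     sets = []
--     dup = []
--     for row in w:
--         s = []
--         acc = 0
--         for x in row:
--             acc += x
--             s.append(acc)
--         ds = set(s)
--         sets.append(ds)
--         dup.append(len(s) - len(ds))
--     t = [[0] * n for _ in range(n)]
--     for i in range(n):
--         for j in range(i):
--             v = 1 if dup[i] + dup[j] + len(sets[i] & sets[j]) <= 1 else 0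
--             t[i][j] = t[j][i] = v
--     return t
-- ===== Notes on version B (the rewrite author's own statement) =====
-- stated objective: faster
-- what changed: B precomputes each row's prefix-sum set and duplicate deficit once, then decides each pair by counting collapsed seam values (intra-row duplicates plus shared distinct seams <= 1) instead of rebuilding both prefix-sum lists with quadratic slice sums inside the pair loop and deduplicating their concatenation.
import Mathlib
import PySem

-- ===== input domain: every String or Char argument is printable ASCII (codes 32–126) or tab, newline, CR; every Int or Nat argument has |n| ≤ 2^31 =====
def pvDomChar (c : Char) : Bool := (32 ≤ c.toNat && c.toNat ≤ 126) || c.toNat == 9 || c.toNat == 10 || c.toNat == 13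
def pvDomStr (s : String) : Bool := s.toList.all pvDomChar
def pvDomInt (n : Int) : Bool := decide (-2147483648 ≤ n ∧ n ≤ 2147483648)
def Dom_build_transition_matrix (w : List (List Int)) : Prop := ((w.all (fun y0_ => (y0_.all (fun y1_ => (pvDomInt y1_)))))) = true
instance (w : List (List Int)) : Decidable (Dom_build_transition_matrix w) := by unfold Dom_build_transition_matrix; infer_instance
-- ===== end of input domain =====

-- B precomputes each row's prefix-sum set and duplicate deficit once and tests pairs by
-- counting collapsed seam values, instead of rebuilding both prefix lists for every pair.

-- ===== PORT A =====
def build_transition_matrix (w : List (List Int)) : List (List Int) :=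
  let t := w.map (fun _ => w.map (fun _ => (0 : Int)))
  (PySem.List.pyRange 0 (w.length : Int) 1).foldl (fun t i =>
    (PySem.List.pyRange 0 i 1).foldl (fun t j =>
      let wi := PySem.List.pyGetD w i []
      let wj := PySem.List.pyGetD w j []
      let si := (PySem.List.pyRange 0 (wi.length : Int) 1).map
        (fun k => (PySem.List.slice wi none (some (k + 1))).sum)
      let sj := (PySem.List.pyRange 0 (wj.length : Int) 1).map
        (fun k => (PySem.List.slice wj none (some (k + 1))).sum)
      if ((PySem.Set.ofList (si ++ sj)).length : Int) <
          (wi.length : Int) + (wj.length : Int) - 1 then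
        let t := PySem.List.pySetD t i (PySem.List.pySetD (PySem.List.pyGetD t i []) j 0)
        PySem.List.pySetD t j (PySem.List.pySetD (PySem.List.pyGetD t j []) i 0)
      else
        let t := PySem.List.pySetD t i (PySem.List.pySetD (PySem.List.pyGetD t i []) j 1)
        PySem.List.pySetD t j (PySem.List.pySetD (PySem.List.pyGetD t j []) i 1)) t) t

-- ===== PORT B =====
def build_transition_matrix_alt (w : List (List Int)) : List (List Int) :=
  let n := w.length
  let sd := w.foldl (fun (p : List (PySem.Set Int) × List Int) row =>
      let s := (row.foldl (fun (q : List Int × Int) x => (q.1 ++ [q.2 + x], q.2 + x)) ([], 0)).1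
      let ds := PySem.Set.ofList s
      (p.1 ++ [ds], p.2 ++ [(s.length : Int) - (ds.length : Int)])) ([], [])
  let sets := sd.1
  let dup := sd.2
  let t := List.replicate n (List.replicate n (0 : Int))
  (PySem.List.pyRange 0 (n : Int) 1).foldl (fun t i =>
    (PySem.List.pyRange 0 i 1).foldl (fun t j =>
      let v : Int := if PySem.List.pyGetD dup i 0 + PySem.List.pyGetD dup j 0 +
          ((PySem.Set.inter (PySem.List.pyGetD sets i []) (PySem.List.pyGetD sets j [])).length : Int) ≤ 1
        then 1 else 0
      let t := PySem.List.pySetD t i (PySem.List.pySetD (PySem.List.pyGetD t i []) j v)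
      PySem.List.pySetD t j (PySem.List.pySetD (PySem.List.pyGetD t j []) i v)) t) t

-- ===== PRECONDITION & SPEC =====
def Spec_build_transition_matrix (w : List (List Int)) (out : List (List Int)) : Prop := out = build_transition_matrix_alt w
instance (w : List (List Int)) (out : List (List Int)) : Decidable (Spec_build_transition_matrix w out) := by unfold Spec_build_transition_matrix; infer_instance

-- ===== CLAIM (what is proved, stated in full; the proofs are below) =====
def Claim_equal_build_transition_matrix : Prop := ∀ (w : List (List Int)), Dom_build_transition_matrix w → Spec_build_transition_matrix w (build_transition_matrix w)

-- ===== LEMMAS AND PROOFS =====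

-- the list of prefix sums of a row, and its set / intra-row duplicate deficit
def pvPfx (row : List Int) : List Int :=
  (List.range row.length).map (fun k => (row.take (k + 1)).sum)

def pvRowSet (row : List Int) : PySem.Set Int := PySem.Set.ofList (pvPfx row)

def pvRowDup (row : List Int) : Int := (row.length : Int) - ((pvRowSet row).length : Int)

-- B's running-sum loop builds exactly the prefix-sum list
theorem pvFoldPrefix (row : List Int) : ∀ (pre : List Int) (acc : Int),
    (row.foldl (fun (q : List Int × Int) x => (q.1 ++ [q.2 + x], q.2 + x)) (pre, acc)).1
      = pre ++ (List.range row.length).map (fun k => acc + (row.take (k + 1)).sum) := by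
  induction row with
  | nil => simp
  | cons x r ih =>
    intro pre acc
    simp only [List.foldl_cons]
    rw [ih (pre ++ [acc + x]) (acc + x)]
    rw [List.length_cons, List.range_succ_eq_map]
    simp [List.map_map, Function.comp, List.append_assoc, add_assoc]

-- A's slice comprehension builds the same prefix-sum list
theorem pvSlicePrefix (row : List Int) :
    (PySem.List.pyRange 0 (row.length : Int) 1).map
      (fun k => (PySem.List.slice row none (some (k + 1))).sum) = pvPfx row := by
  rw [PySem.List.pyRange_zero_nat, List.map_map, pvPfx]
  refine List.map_congr_left ?_
  intro k hk
  simp only [Function.comp]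
  have : ((k : Int) + 1) = ((k + 1 : Nat) : Int) := by push_cast; ring
  rw [this, PySem.List.slice_to_natCast]

-- B's precomputation fold is a pair of maps
theorem pvSdEq (w : List (List Int)) :
    (w.foldl (fun (p : List (PySem.Set Int) × List Int) row =>
      let s := (row.foldl (fun (q : List Int × Int) x => (q.1 ++ [q.2 + x], q.2 + x)) ([], 0)).1
      let ds := PySem.Set.ofList s
      (p.1 ++ [ds], p.2 ++ [(s.length : Int) - (ds.length : Int)])) ([], []))
    = (w.map pvRowSet, w.map pvRowDup) := by
  have gen : ∀ (ws : List (List Int)) (p1 : List (PySem.Set Int)) (p2 : List Int),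
      (ws.foldl (fun (p : List (PySem.Set Int) × List Int) row =>
        let s := (row.foldl (fun (q : List Int × Int) x => (q.1 ++ [q.2 + x], q.2 + x)) ([], 0)).1
        let ds := PySem.Set.ofList s
        (p.1 ++ [ds], p.2 ++ [(s.length : Int) - (ds.length : Int)])) (p1, p2))
      = (p1 ++ ws.map pvRowSet, p2 ++ ws.map pvRowDup) := by
    intro ws
    induction ws with
    | nil => simp
    | cons row r ih =>
      intro p1 p2
      simp only [List.foldl_cons, List.map_cons]
      rw [ih]
      have hpfx : (row.foldl (fun (q : List Int × Int) x => (q.1 ++ [q.2 + x], q.2 + x)) (([]:List Int), (0:Int))).1 = pvPfx row := by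
        rw [pvFoldPrefix row [] 0]; simp [pvPfx]
      rw [hpfx]
      have hlen : (pvPfx row).length = row.length := by simp [pvPfx]
      simp [pvRowSet, pvRowDup, hlen, List.append_assoc]
  rw [gen]; simp

-- the shared-seam count is symmetric in the two (deduplicated) seam sets
theorem pvInterLen (si sj : List Int) :
    ((PySem.Set.ofList sj).filter (fun y => (PySem.Set.ofList si).contains y)).length
      = (PySem.Set.inter (PySem.Set.ofList si) (PySem.Set.ofList sj)).length := by
  apply List.Perm.length_eq
  unfold PySem.Set.inter
  rw [List.perm_ext_iff_of_nodup ((PySem.Set.nodup_ofList sj).filter _)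
      ((PySem.Set.nodup_ofList si).filter _)]
  intro a
  simp [List.mem_filter, PySem.Set.mem_ofList, and_comm]

-- core condition equivalence: 'fewer than ni+nj-1 distinct seams' = 'more than one collapsed value'
theorem pvCond (si sj : List Int) :
    (((PySem.Set.ofList (si ++ sj)).length : Int) <
        (si.length : Int) + (sj.length : Int) - 1)
      ↔ ¬ (((si.length : Int) - ((PySem.Set.ofList si).length : Int)) +
            (((sj.length : Int) - ((PySem.Set.ofList sj).length : Int))) +
            ((PySem.Set.inter (PySem.Set.ofList si) (PySem.Set.ofList sj)).length : Int) ≤ 1) := by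
  rw [PySem.Set.ofList_append, PySem.Set.update_eq_append_filter, List.length_append]
  have hsplit := List.length_eq_length_filter_add
    (l := PySem.Set.ofList sj) (f := fun y => (PySem.Set.ofList si).contains y)
  rw [pvInterLen] at hsplit
  push_cast [hsplit]
  have h1 := PySem.Set.length_ofList_le si
  have h2 := PySem.Set.length_ofList_le sj
  omega

-- pvCond specialised to two rows' prefix-sum lists
theorem pvCondRow (wi wj : List Int) :
    (((PySem.Set.ofList (pvPfx wi ++ pvPfx wj)).length : Int) <
        (wi.length : Int) + (wj.length : Int) - 1)
      ↔ ¬ (pvRowDup wi + pvRowDup wj +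
            ((PySem.Set.inter (pvRowSet wi) (pvRowSet wj)).length : Int) ≤ 1) := by
  have l1 : (pvPfx wi).length = wi.length := by simp [pvPfx]
  have l2 : (pvPfx wj).length = wj.length := by simp [pvPfx]
  have := pvCond (pvPfx wi) (pvPfx wj)
  rw [l1, l2] at this
  simpa [pvRowSet, pvRowDup, l1, l2] using this

-- the two double loops agree pair by pair
theorem pvMain (w : List (List Int)) :
    build_transition_matrix w = build_transition_matrix_alt w := by
  unfold build_transition_matrix build_transition_matrix_alt
  rw [pvSdEq]
  have ht : w.map (fun _ => w.map (fun _ => (0 : Int)))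
      = List.replicate w.length (List.replicate w.length (0 : Int)) := by
    simp [List.map_const']
  simp only [ht]
  apply PySem.List.foldl_congr_mem
  intro t i hi
  apply PySem.List.foldl_congr_mem
  intro t' j hj
  rw [PySem.List.mem_pyRange_one] at hi hj
  obtain ⟨hi0, hin⟩ := hi
  obtain ⟨hj0, hji⟩ := hj
  have hkin : i.toNat < w.length := by omega
  have hkjn : j.toNat < w.length := by omega
  have hwi : PySem.List.pyGetD w i ([] : List Int) = w[i.toNat] := by
    rw [PySem.List.pyGetD_of_nonneg _ _ hi0, List.getD_eq_getElem _ _ hkin]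
  have hwj : PySem.List.pyGetD w j ([] : List Int) = w[j.toNat] := by
    rw [PySem.List.pyGetD_of_nonneg _ _ hj0, List.getD_eq_getElem _ _ hkjn]
  have hsi : PySem.List.pyGetD (w.map pvRowSet) i ([] : PySem.Set Int) = pvRowSet w[i.toNat] := by
    rw [PySem.List.pyGetD_of_nonneg _ _ hi0,
      List.getD_eq_getElem _ _ (by simpa using hkin), List.getElem_map]
  have hsj : PySem.List.pyGetD (w.map pvRowSet) j ([] : PySem.Set Int) = pvRowSet w[j.toNat] := by
    rw [PySem.List.pyGetD_of_nonneg _ _ hj0,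
      List.getD_eq_getElem _ _ (by simpa using hkjn), List.getElem_map]
  have hdi : PySem.List.pyGetD (w.map pvRowDup) i (0 : Int) = pvRowDup w[i.toNat] := by
    rw [PySem.List.pyGetD_of_nonneg _ _ hi0,
      List.getD_eq_getElem _ _ (by simpa using hkin), List.getElem_map]
  have hdj : PySem.List.pyGetD (w.map pvRowDup) j (0 : Int) = pvRowDup w[j.toNat] := by
    rw [PySem.List.pyGetD_of_nonneg _ _ hj0,
      List.getD_eq_getElem _ _ (by simpa using hkjn), List.getElem_map]
  simp only [hwi, hwj, hsi, hsj, hdi, hdj, pvSlicePrefix]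
  by_cases hc : pvRowDup w[i.toNat] + pvRowDup w[j.toNat] +
      ((PySem.Set.inter (pvRowSet w[i.toNat]) (pvRowSet w[j.toNat])).length : Int) ≤ 1
  · rw [if_neg (fun hA => ((pvCondRow _ _).mp hA) hc), if_pos hc]
  · rw [if_pos ((pvCondRow _ _).mpr hc), if_neg hc]

-- ===== VERDICT (by name: the statement is the Claim_ definition above) =====
theorem build_transition_matrix_spec : Claim_equal_build_transition_matrix := by
  intro w _
  unfold Spec_build_transition_matrix
  exact pvMain w
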